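-- pv_equiv track=rewrite | github.com/CYRTRUS/final_project_y1_ske23 | lib/component/scene_stats.py | _split_sessions
-- ===== SOURCE A (Python) =====
-- def _split_sessions(rows):
--     """
--     Split the full log into individual play-sessions.
--     A session ends when a 'program_closed == True' row is encountered.
--     """
--     sessions, current = [], []
--     for r in rows:
--         current.append(r)
--         if r.get("program_closed") == "True":
--             sessions.append(current)
--             current = []
--     if current:
--         sessions.append(current)
--     return sessions
-- ===== SOURCE B (Python) =====
-- def _split_sessions(rows):
--     """
--     Split the full log into individual play-sessions.
--     A session ends when a 'program_closed == True' row is encountered.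
--     """
--     sessions = []
--     rest = list(rows)
--     while rest:
--         for i, r in enumerate(rest):
--             if r.get("program_closed") == "True":
--                 sessions.append(rest[:i + 1])
--                 rest = rest[i + 1:]
--                 break
--         else:
--             sessions.append(rest)
--             rest = []
--     return sessions
-- ===== Notes on version B (the rewrite author's own statement) =====
-- stated objective: alternative
-- what changed: B replaces A's single accumulator pass with a scan-and-slice loop: it repeatedly finds the first 'program_closed == True' marker in the remaining rows, slices that session off, and continues on the tail.
import Mathlib
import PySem

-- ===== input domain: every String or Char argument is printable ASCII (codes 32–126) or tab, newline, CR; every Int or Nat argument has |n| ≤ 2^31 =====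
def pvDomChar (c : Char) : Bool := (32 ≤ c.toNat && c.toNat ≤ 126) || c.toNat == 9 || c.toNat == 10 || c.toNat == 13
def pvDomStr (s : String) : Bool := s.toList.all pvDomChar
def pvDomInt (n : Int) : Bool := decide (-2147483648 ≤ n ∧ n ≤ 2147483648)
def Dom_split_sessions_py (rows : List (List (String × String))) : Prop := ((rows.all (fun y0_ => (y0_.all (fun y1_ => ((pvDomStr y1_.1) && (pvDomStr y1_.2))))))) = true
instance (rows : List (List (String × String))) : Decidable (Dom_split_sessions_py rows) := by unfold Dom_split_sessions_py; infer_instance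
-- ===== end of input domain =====

-- B splits by repeatedly locating the first session marker and slicing; equal to A's one-pass accumulator (alternative decomposition, same cost).


-- shared helper: r.get("program_closed") == "True"  (Python dict lookup: first match)
def pvMarker (r : List (String × String)) : Bool :=
  (PySem.Dict.mk r).get? "program_closed" == some "True"

-- ===== PORT A =====
-- the loop state is (sessions, current); the trailing `if current:` wraps up
def split_sessions_py (rows : List (List (String × String))) : List (List (List (String × String))) :=
  let st := rows.foldl
    (fun (st : List (List (List (String × String))) × List (List (String × String))) r =>
      let current := st.2 ++ [r]
      if pvMarker r then (st.1 ++ [current], []) else (st.1, current))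
    ([], [])
  if st.2 = [] then st.1 else st.1 ++ [st.2]

-- ===== PORT B =====
-- inner `for i, r in enumerate(rest): … break` = first index with a marker
def pvFindMarker (rows : List (List (String × String))) (i : Nat) : Option Nat :=
  match rows with
  | [] => none
  | r :: rs => if pvMarker r then some i else pvFindMarker rs (i + 1)

theorem pvFindMarker_lt (rows : List (List (String × String))) (i j : Nat)
    (h : pvFindMarker rows i = some j) : j < i + rows.length := by
  induction rows generalizing i with
  | nil => simp [pvFindMarker] at h
  | cons r rs ih =>
    rw [pvFindMarker] at h
    split at h
    · obtain rfl : i = j := by simpa using h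
      simp only [List.length_cons]; omega
    · have := ih (i + 1) h
      simp only [List.length_cons]; omega

-- outer while loop: slice off one session at a time
def split_sessions_py_alt (rows : List (List (String × String))) : List (List (List (String × String))) :=
  match h : pvFindMarker rows 0 with
  | none => if rows = [] then [] else [rows]
  | some i => rows.take (i + 1) :: split_sessions_py_alt (rows.drop (i + 1))
termination_by rows.length
decreasing_by
  have hlt := pvFindMarker_lt rows 0 i h
  simp only [List.length_drop]
  omega

-- ===== PRECONDITION & SPEC =====
def Spec_split_sessions_py (rows : List (List (String × String))) (out : List (List (List (String × String)))) : Prop := out = split_sessions_py_alt rows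
instance (rows : List (List (String × String))) (out : List (List (List (String × String)))) : Decidable (Spec_split_sessions_py rows out) := by unfold Spec_split_sessions_py; infer_instance

-- ===== CLAIM (what is proved, stated in full; the proofs are below) =====
def Claim_equal_split_sessions_py : Prop := ∀ (rows : List (List (String × String))), Dom_split_sessions_py rows → Spec_split_sessions_py rows (split_sessions_py rows)

-- ===== LEMMAS AND PROOFS =====

-- reference splitter: A's loop with the accumulator made structural
def pvSplitWith (current : List (List (String × String))) (rows : List (List (String × String))) : List (List (List (String × String))) :=
  match rows with
  | [] => if current = [] then [] else [current]
  | r :: rs => if pvMarker r then (current ++ [r]) :: pvSplitWith [] rs else pvSplitWith (current ++ [r]) rs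

theorem pvFoldA_eq (rows : List (List (String × String)))
    (sessions : List (List (List (String × String)))) (current : List (List (String × String))) :
    (let st := rows.foldl
      (fun (st : List (List (List (String × String))) × List (List (String × String))) r =>
        let current := st.2 ++ [r]
        if pvMarker r then (st.1 ++ [current], []) else (st.1, current))
      (sessions, current)
     if st.2 = [] then st.1 else st.1 ++ [st.2]) = sessions ++ pvSplitWith current rows := by
  induction rows generalizing sessions current with
  | nil =>
    simp only [List.foldl_nil, pvSplitWith]
    split <;> simp_all
  | cons r rs ih =>
    simp only [List.foldl_cons, pvSplitWith]
    by_cases h : pvMarker r <;> (simp only [h]; simp only [if_true, Bool.false_eq_true, if_false]; rw [ih]; try simp)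

theorem pvFindMarker_shift (rows : List (List (String × String))) (n : Nat) :
    pvFindMarker rows (n + 1) = (pvFindMarker rows n).map (· + 1) := by
  induction rows generalizing n with
  | nil => simp [pvFindMarker]
  | cons r rs ih =>
    simp only [pvFindMarker]
    split
    · simp
    · exact ih (n + 1)


theorem pvAlt_unfold_nomark (rows : List (List (String × String))) (h : pvFindMarker rows 0 = none) :
    split_sessions_py_alt rows = if rows = [] then [] else [rows] := by
  rw [split_sessions_py_alt]
  split
  · rfl
  · next i hi => rw [h] at hi; cases hi

theorem pvAlt_unfold_mark (rows : List (List (String × String))) (i : Nat) (h : pvFindMarker rows 0 = some i) :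
    split_sessions_py_alt rows = rows.take (i + 1) :: split_sessions_py_alt (rows.drop (i + 1)) := by
  rw [split_sessions_py_alt]
  split
  · next hn => rw [h] at hn; cases hn
  · next j hj => rw [h] at hj; cases hj; rfl

theorem pvSplitWith_eq_alt (rows : List (List (String × String))) (current : List (List (String × String))) :
    pvSplitWith current rows =
      match pvFindMarker rows 0 with
      | none => if current = [] ∧ rows = [] then [] else [current ++ rows]
      | some i => (current ++ rows.take (i + 1)) :: split_sessions_py_alt (rows.drop (i + 1)) := by
  induction rows generalizing current with
  | nil =>
    simp only [pvFindMarker, pvSplitWith]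
    split <;> simp_all
  | cons r rs ih =>
    by_cases h : pvMarker r
    · have hR : pvSplitWith [] rs = split_sessions_py_alt rs := by
        rw [ih []]
        cases hf : pvFindMarker rs 0 with
        | none => rw [pvAlt_unfold_nomark rs hf]; split <;> simp_all
        | some i => rw [pvAlt_unfold_mark rs i hf]; simp
      simp only [pvSplitWith, pvFindMarker, h, if_true, hR]
      simp
    · simp only [pvSplitWith, pvFindMarker, h]
      simp only [Bool.false_eq_true, if_false]
      rw [ih (current ++ [r]), pvFindMarker_shift rs 0]
      cases hf : pvFindMarker rs 0 with
      | none => simp only [Option.map_none]; simp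
      | some i => simp only [Option.map_some]; simp [List.take_succ_cons, List.drop_succ_cons]



-- ===== VERDICT (by name: the statement is the Claim_ definition above) =====
theorem split_sessions_py_spec : Claim_equal_split_sessions_py := by
  intro rows _
  show split_sessions_py rows = split_sessions_py_alt rows
  unfold split_sessions_py
  rw [pvFoldA_eq rows [] []]
  rw [pvSplitWith_eq_alt rows []]
  cases hf : pvFindMarker rows 0 with
  | none => rw [pvAlt_unfold_nomark rows hf]; split <;> simp_all
  | some i => rw [pvAlt_unfold_mark rows i hf]; simp only [List.nil_append]
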